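-- pv_equiv track=rewrite | github.com/mohanganesh3/ship | training/phase2_optionc_common.py | round_robin_pick
-- ===== SOURCE A (Python) =====
-- def normalize_space(text: str | None) -> str:
--     return " ".join(str(text or "").split()).strip()
--
-- def coalesce_question(record: dict) -> str:
--     return normalize_space(record.get("q") or record.get("question") or record.get("prompt"))
--
-- def question_sort_key(record: dict) -> str:
--     return f"{normalize_space(record.get('domain_letter'))}\t{normalize_space(record.get('subtopic_id'))}\t{coalesce_question(record).lower()}"
--
-- def bucket_records_by_domain(records: list[dict]) -> dict[str, list[dict]]:
--     buckets: dict[str, list[dict]] = {}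
--     for record in records:
--         domain = normalize_space(record.get("domain_letter") or "UNK")
--         buckets.setdefault(domain, []).append(record)
--     for key in buckets:
--         buckets[key] = sorted(buckets[key], key=question_sort_key)
--     return buckets
--
-- def round_robin_pick(records: list[dict], n: int) -> list[dict]:
--     buckets = bucket_records_by_domain(records)
--     domains = sorted(buckets.keys())
--     picked: list[dict] = []
--     seen = set()
--     while len(picked) < n and domains:
--         next_domains = []
--         for domain in domains:
--             bucket = buckets[domain]
--             if not bucket:
--                 continue
--             candidate = bucket.pop(0)
--             qkey = coalesce_question(candidate).lower()
--             if qkey in seen: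
--                 if bucket:
--                     next_domains.append(domain)
--                 continue
--             seen.add(qkey)
--             picked.append(candidate)
--             if bucket and len(picked) < n:
--                 next_domains.append(domain)
--             if len(picked) >= n:
--                 break
--         domains = next_domains
--     return picked
-- ===== SOURCE B (Python) =====
-- def normalize_space(text: str | None) -> str:
--     return " ".join(str(text or "").split()).strip()
--
-- def coalesce_question(record: dict) -> str:
--     return normalize_space(record.get("q") or record.get("question") or record.get("prompt"))
--
-- def question_sort_key(record: dict) -> str:
--     return f"{normalize_space(record.get('domain_letter'))}\t{normalize_space(record.get('subtopic_id'))}\t{coalesce_question(record).lower()}"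
--
-- def bucket_records_by_domain(records: list[dict]) -> dict[str, list[dict]]:
--     buckets: dict[str, list[dict]] = {}
--     for record in records:
--         domain = normalize_space(record.get("domain_letter") or "UNK")
--         buckets.setdefault(domain, []).append(record)
--     for key in buckets:
--         buckets[key] = sorted(buckets[key], key=question_sort_key)
--     return buckets
--
-- def round_robin_pick(records: list[dict], n: int) -> list[dict]:
--     buckets = bucket_records_by_domain(records)
--     lists = [buckets[domain] for domain in sorted(buckets)]
--     # Flatten the buckets column by column (the round-robin visiting order).
--     flat: list[dict] = []
--     while any(lists):
--         flat.extend(bucket[0] for bucket in lists if bucket)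
--         lists = [bucket[1:] for bucket in lists]
--     # One pass: keep the first record per question key, stop at n.
--     picked: list[dict] = []
--     seen = set()
--     for record in flat:
--         if len(picked) >= n:
--             break
--         qkey = coalesce_question(record).lower()
--         if qkey not in seen:
--             seen.add(qkey)
--             picked.append(record)
--     return picked
-- ===== Notes on version B (the rewrite author's own statement) =====
-- stated objective: alternative
-- what changed: B replaces A's stateful while-loop (mutating buckets via pop(0) and maintaining a next_domains worklist) by first flattening the sorted buckets column-by-column into the round-robin visiting order and then making a single dedup pass with an early stop at n.
import Mathlib
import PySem

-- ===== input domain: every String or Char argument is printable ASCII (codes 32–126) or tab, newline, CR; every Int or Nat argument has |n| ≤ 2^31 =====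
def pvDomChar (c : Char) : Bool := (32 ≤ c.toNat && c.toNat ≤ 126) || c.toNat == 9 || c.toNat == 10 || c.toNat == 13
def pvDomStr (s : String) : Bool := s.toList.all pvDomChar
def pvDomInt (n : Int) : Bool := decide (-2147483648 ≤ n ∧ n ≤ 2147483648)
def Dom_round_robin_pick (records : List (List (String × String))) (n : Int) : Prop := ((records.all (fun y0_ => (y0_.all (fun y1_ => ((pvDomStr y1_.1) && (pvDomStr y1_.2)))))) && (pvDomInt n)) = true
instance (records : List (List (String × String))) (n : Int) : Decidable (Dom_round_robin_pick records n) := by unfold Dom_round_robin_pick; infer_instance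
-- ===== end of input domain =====

-- B flattens the sorted buckets into the round-robin visiting order once and then makes a single
-- dedup pass with an early stop, instead of A's while loop with bucket mutation and a next_domains
-- worklist (objective: alternative decomposition, same asymptotic cost).

-- ===== PORT A =====
-- shared module helpers (used verbatim by both A and B, as in the Python module)

-- Python's 'x or y' on optional strings ('' and None are falsy)
def pyOrStr (a b : Option String) : Option String :=
  match a with
  | some s => if s = "" then b else some s
  | none => b

-- record.get(k): first-match lookup in the association list (the dict)
def recGet (r : List (String × String)) (k : String) : Option String :=
  (PySem.Dict.mk r).get? k

def normalize_space (text : Option String) : String :=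
  PySem.Str.strip (PySem.Str.join " " (PySem.Str.split₀ (text.getD "")))

def coalesce_question (r : List (String × String)) : String :=
  normalize_space (pyOrStr (recGet r "q") (pyOrStr (recGet r "question") (recGet r "prompt")))

def question_sort_key (r : List (String × String)) : String :=
  normalize_space (recGet r "domain_letter") ++ "\t" ++ normalize_space (recGet r "subtopic_id")
    ++ "\t" ++ PySem.Str.lower (coalesce_question r)

def bucket_records_by_domain (records : List (List (String × String))) :
    PySem.Dict String (List (List (String × String))) :=
  let buckets := records.foldl (fun b r =>
    let domain := normalize_space (pyOrStr (recGet r "domain_letter") (some "UNK"))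
    -- buckets.setdefault(domain, []).append(record)
    match b.get? domain with
    | none => b.insert domain [r]
    | some l => b.insert domain (l ++ [r])) PySem.Dict.empty
  buckets.keys.foldl (fun b k => b.insert k (PySem.List.sorted (b.getD k []) question_sort_key)) buckets

-- the question key used for dedup: coalesce_question(candidate).lower()
def qlower (r : List (String × String)) : String := PySem.Str.lower (coalesce_question r)

-- the inner 'for domain in domains' loop of A; returns (buckets, picked, seen, next_domains)
def aFor (n : Int) : List String → PySem.Dict String (List (List (String × String))) →
    List (List (String × String)) → PySem.Set String → List String →
    PySem.Dict String (List (List (String × String))) × List (List (String × String)) × PySem.Set String × List String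
  | [], b, picked, seen, nd => (b, picked, seen, nd)
  | d :: rest, b, picked, seen, nd =>
    match b.getD d [] with            -- bucket = buckets[domain]; KeyError cannot occur (d is a key)
    | [] => aFor n rest b picked seen nd            -- if not bucket: continue
    | candidate :: tail =>
      let b' := b.insert d tail                     -- candidate = bucket.pop(0)
      let qkey := qlower candidate
      if PySem.Set.contains seen qkey then
        aFor n rest b' picked seen (if tail.isEmpty then nd else nd ++ [d])
      else
        let seen' := PySem.Set.add seen qkey
        let picked' := picked ++ [candidate]
        let nd' := if !tail.isEmpty ∧ (picked'.length : Int) < n then nd ++ [d] else nd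
        if (picked'.length : Int) ≥ n then (b', picked', seen', nd')    -- break
        else aFor n rest b' picked' seen' nd'

-- the while loop of A (fuel = total bucket size + 2 makes the recursion structural; it is sufficient)
def aWhile (n : Int) : Nat → PySem.Dict String (List (List (String × String))) → List String →
    List (List (String × String)) → PySem.Set String → List (List (String × String))
  | 0, _, _, picked, _ => picked
  | fuel + 1, b, ds, picked, seen =>
    if (picked.length : Int) < n ∧ ds ≠ [] then
      match aFor n ds b picked seen [] with
      | (b', picked', seen', nd) => aWhile n fuel b' nd picked' seen'
    else picked

def round_robin_pick (records : List (List (String × String))) (n : Int) :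
    List (List (String × String)) :=
  let buckets := bucket_records_by_domain records
  let domains := PySem.List.sorted buckets.keys (fun k => k)
  let fuel := (domains.map (fun d => (buckets.getD d []).length)).sum + 2
  aWhile n fuel buckets domains [] PySem.Set.empty

-- ===== PORT B =====

-- termination helper for interleave (cited by its decreasing_by)
theorem pvSumTailsLt (ls : List (List (List (String × String))))
    (h : ls.any (fun l => !l.isEmpty) = true) :
    ((ls.map List.tail).map List.length).sum < (ls.map List.length).sum := by
  induction ls with
  | nil => simp at h
  | cons x xs ih =>
    simp only [List.any_cons, Bool.or_eq_true] at h
    rcases h with h | h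
    · cases x with
      | nil => simp at h
      | cons a t =>
        have : ((xs.map List.tail).map List.length).sum ≤ (xs.map List.length).sum := by
          clear ih; induction xs with
          | nil => simp
          | cons y ys ih2 => simp only [List.map_cons, List.sum_cons]
                             have : y.tail.length ≤ y.length := by cases y <;> simp
                             omega
        simp only [List.map_cons, List.sum_cons, List.tail_cons, List.length_cons]
        omega
    · have := ih h
      have : x.tail.length ≤ x.length := by cases x <;> simp
      simp only [List.map_cons, List.sum_cons]
      omega

-- flatten column by column: while any(lists): take heads, drop one element from each list
def interleave (ls : List (List (List (String × String)))) : List (List (String × String)) :=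
  if h : ls.any (fun l => !l.isEmpty) = true then
    ls.filterMap List.head? ++ interleave (ls.map List.tail)
  else []
  termination_by (ls.map List.length).sum
  decreasing_by simpa using pvSumTailsLt ls h

-- the single dedup pass with early stop
def bPass (n : Int) : List (List (String × String)) → List (List (String × String)) →
    PySem.Set String → List (List (String × String))
  | [], picked, _ => picked
  | r :: rest, picked, seen =>
    if (picked.length : Int) ≥ n then picked
    else
      let qkey := qlower r
      if PySem.Set.contains seen qkey then bPass n rest picked seen
      else bPass n rest (picked ++ [r]) (PySem.Set.add seen qkey)

def round_robin_pick_alt (records : List (List (String × String))) (n : Int) :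
    List (List (String × String)) :=
  let buckets := bucket_records_by_domain records
  let lists := (PySem.List.sorted buckets.keys (fun k => k)).map (fun d => buckets.getD d [])
  bPass n (interleave lists) [] PySem.Set.empty

-- ===== PRECONDITION & SPEC =====
def Spec_round_robin_pick (records : List (List (String × String))) (n : Int) (out : List (List (String × String))) : Prop := out = round_robin_pick_alt records n
instance (records : List (List (String × String))) (n : Int) (out : List (List (String × String))) : Decidable (Spec_round_robin_pick records n out) := by unfold Spec_round_robin_pick; infer_instance

-- ===== CLAIM (what is proved, stated in full; the proofs are below) =====
def Claim_equal_round_robin_pick : Prop := ∀ (records : List (List (String × String))) (n : Int), Dom_round_robin_pick records n → Spec_round_robin_pick records n (round_robin_pick records n)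

-- ===== LEMMAS AND PROOFS =====

theorem bPass_full (n : Int) (l picked : List (List (String × String))) (seen : PySem.Set String)
    (h : (picked.length : Int) ≥ n) : bPass n l picked seen = picked := by
  cases l with
  | nil => rfl
  | cons r rest => simp [bPass, h]

-- A's inner for loop agrees with one column of B's single pass
theorem aFor_main (n : Int) (ds : List String) :
    ∀ (b : PySem.Dict String (List (List (String × String)))) picked seen nd b' p' s' nd',
    ds.Nodup → (picked.length : Int) < n →
    aFor n ds b picked seen nd = (b', p', s', nd') →
    ((∀ R, bPass n (ds.filterMap (fun d => (b.getD d []).head?) ++ R) picked seen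
        = if (p'.length : Int) ≥ n then p' else bPass n R p' s')
     ∧ (¬ (p'.length : Int) ≥ n →
          nd' = nd ++ ds.filter (fun d => !(b.getD d []).tail.isEmpty)
          ∧ ∀ d, b'.getD d [] = if d ∈ ds then (b.getD d []).tail else b.getD d [])) := by
  induction ds with
  | nil =>
    intro b picked seen nd b' p' s' nd' _ hlt heq
    simp only [aFor, Prod.mk.injEq] at heq
    obtain ⟨hb, hp, hs, hn⟩ := heq
    subst hb; subst hp; subst hs; subst hn
    constructor
    · intro R
      rw [if_neg (not_le.mpr hlt)]
      simp
    · intro _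
      simp
  | cons d rest ih =>
    intro b picked seen nd b' p' s' nd' hnd hlt heq
    have hdrest : d ∉ rest := (List.nodup_cons.mp hnd).1
    have hndr : rest.Nodup := (List.nodup_cons.mp hnd).2
    rcases hb : b.getD d [] with _ | ⟨c, tail⟩
    · -- empty bucket: continue
      simp only [aFor, hb] at heq
      have hih := ih b picked seen nd b' p' s' nd' hndr hlt heq
      constructor
      · intro R
        have hh : (d :: rest).filterMap (fun d => (b.getD d []).head?)
             = rest.filterMap (fun d => (b.getD d []).head?) := by
          simp [hb]
        rw [hh]
        exact hih.1 R
      · intro hng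
        obtain ⟨h1, h2⟩ := hih.2 hng
        refine ⟨?_, ?_⟩
        · rw [h1]
          simp [hb]
        · intro d'
          rw [h2 d']
          by_cases hd' : d' = d
          · subst hd'; simp [hb, hdrest]
          · simp [List.mem_cons, hd']
    · -- bucket = c :: tail
      have hrest_get : ∀ d' ∈ rest, (b.insert d tail).getD d' [] = b.getD d' [] := by
        intro d' hd'
        have hne : d' ≠ d := fun h => hdrest (h ▸ hd')
        rw [PySem.Dict.getD_insert, if_neg hne]
      have hheads : (d :: rest).filterMap (fun d => (b.getD d []).head?)
          = c :: rest.filterMap (fun d => (b.getD d []).head?) := by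
        simp [hb]
      have hheads' : rest.filterMap (fun d' => ((b.insert d tail).getD d' []).head?)
          = rest.filterMap (fun d' => (b.getD d' []).head?) := by
        apply List.filterMap_congr
        intro d' hd'
        rw [hrest_get d' hd']
      have hfilter' : rest.filter (fun d' => !((b.insert d tail).getD d' []).tail.isEmpty)
          = rest.filter (fun d' => !(b.getD d' []).tail.isEmpty) := by
        apply List.filter_congr
        intro d' hd'
        rw [hrest_get d' hd']
      have hgdpart : (∀ d', b'.getD d' [] = if d' ∈ rest then ((b.insert d tail).getD d' []).tail
              else (b.insert d tail).getD d' []) →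
          ∀ d', b'.getD d' [] = if d' ∈ d :: rest then (b.getD d' []).tail else b.getD d' [] := by
        intro h2 d'
        rw [h2 d']
        by_cases hd' : d' = d
        · subst hd'
          simp [hdrest, hb]
        · rw [PySem.Dict.getD_insert, if_neg hd']
          simp [List.mem_cons, hd']
      have hndpart : ∀ nd'' , nd'' = (if tail.isEmpty then nd else nd ++ [d]) ++
              rest.filter (fun d' => !((b.insert d tail).getD d' []).tail.isEmpty) →
          nd'' = nd ++ (d :: rest).filter (fun d => !(b.getD d []).tail.isEmpty) := by
        intro nd'' h1
        rw [h1, hfilter']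
        rcases htail : tail with _ | ⟨t0, ts⟩
        · simp [hb, htail]
        · simp [hb, htail]
      by_cases hseen : PySem.Set.contains seen (qlower c) = true
      · -- duplicate question: skipped
        simp only [aFor, hb, hseen, if_pos] at heq
        have hih := ih (b.insert d tail) picked seen
          (if tail.isEmpty then nd else nd ++ [d]) b' p' s' nd' hndr hlt heq
        constructor
        · intro R
          rw [hheads]
          simp only [List.cons_append]
          rw [bPass]
          rw [if_neg (not_le.mpr hlt)]
          simp only [hseen, if_pos]
          rw [← hheads']
          exact hih.1 R
        · intro hng
          obtain ⟨h1, h2⟩ := hih.2 hng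
          exact ⟨hndpart nd' h1, hgdpart h2⟩
      · -- new question: picked
        have hseen' : PySem.Set.contains seen (qlower c) = false := Bool.eq_false_iff.mpr hseen
        by_cases hge : ((picked ++ [c]).length : Int) ≥ n
        · -- break
          simp only [aFor, hb, hseen'] at heq
          rw [if_pos hge] at heq
          have hcond : ¬ ((!tail.isEmpty) = true ∧ ((picked ++ [c]).length : Int) < n) := by
            intro hc2; exact absurd hc2.2 (not_lt.mpr hge)
          rw [if_neg hcond] at heq
          injection heq with hb' heq2
          injection heq2 with hp' heq3
          injection heq3 with hs' hn'
          subst hb'; subst hp'; subst hs'; subst hn'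
          constructor
          · intro R
            rw [hheads]
            simp only [List.cons_append]
            rw [bPass]
            rw [if_neg (not_le.mpr hlt)]
            simp only [hseen']
            rw [if_pos hge]
            exact bPass_full n _ _ _ hge
          · intro hng
            exact absurd hge hng
        · -- continue with the new pick
          have hlt' : (((picked ++ [c]).length : Int)) < n := not_le.mp hge
          simp only [aFor, hb, hseen'] at heq
          rw [if_neg hge] at heq
          have hcond : (if (!tail.isEmpty) = true ∧ ((picked ++ [c]).length : Int) < n
              then nd ++ [d] else nd) = (if tail.isEmpty then nd else nd ++ [d]) := by
            by_cases hte : tail.isEmpty = true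
            · rw [if_neg, if_pos hte]
              intro hcc
              rw [hte] at hcc
              exact absurd hcc.1 (by simp)
            · rw [if_pos ⟨by simp [Bool.eq_false_iff.mpr hte], hlt'⟩, if_neg hte]
          rw [hcond] at heq
          have hih := ih (b.insert d tail) (picked ++ [c]) (PySem.Set.add seen (qlower c))
            (if tail.isEmpty then nd else nd ++ [d]) b' p' s' nd' hndr hlt' heq
          constructor
          · intro R
            rw [hheads]
            simp only [List.cons_append]
            rw [bPass]
            rw [if_neg (not_le.mpr hlt)]
            simp only [hseen']
            rw [← hheads']
            exact hih.1 R
          · intro hng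
            obtain ⟨h1, h2⟩ := hih.2 hng
            exact ⟨hndpart nd' h1, hgdpart h2⟩

-- interleave ignores empty lists
theorem heads_filter (ls : List (List (List (String × String)))) :
    (ls.filter (fun l => !l.isEmpty)).filterMap List.head? = ls.filterMap List.head? := by
  induction ls with
  | nil => rfl
  | cons x xs ih =>
    cases x with
    | nil => simpa using ih
    | cons a t => simpa using ih

theorem any_filter_nonempty (ls : List (List (List (String × String)))) :
    (ls.filter (fun l => !l.isEmpty)).any (fun l => !l.isEmpty) = ls.any (fun l => !l.isEmpty) := by
  induction ls with
  | nil => rfl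
  | cons x xs ih =>
    cases x with
    | nil => simpa using ih
    | cons a t => simp

theorem tails_filter (ls : List (List (List (String × String)))) :
    ((ls.filter (fun l => !l.isEmpty)).map List.tail).filter (fun l => !l.isEmpty)
      = (ls.map List.tail).filter (fun l => !l.isEmpty) := by
  induction ls with
  | nil => rfl
  | cons x xs ih =>
    cases x with
    | nil => simpa using ih
    | cons a t =>
      simp only [List.filter_cons, List.isEmpty_cons, Bool.not_false, if_true, List.map_cons,
        List.tail_cons, ih]

theorem sum_filter_le (ls : List (List (List (String × String)))) :
    ((ls.filter (fun l => !l.isEmpty)).map List.length).sum ≤ (ls.map List.length).sum := by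
  induction ls with
  | nil => simp
  | cons x xs ih =>
    cases x with
    | nil => simpa using ih
    | cons a t => simpa using ih

theorem interleave_filter : ∀ (N : Nat) (ls : List (List (List (String × String)))),
    (ls.map List.length).sum ≤ N →
    interleave (ls.filter (fun l => !l.isEmpty)) = interleave ls := by
  intro N
  induction N with
  | zero =>
    intro ls hsum
    have hany : ls.any (fun l => !l.isEmpty) = false := by
      rw [List.any_eq_false]
      intro l hl
      have : l.length ≤ 0 := le_trans (List.single_le_sum (by simp) _ (List.mem_map_of_mem hl)) hsum
      simp [List.eq_nil_of_length_eq_zero (Nat.le_zero.mp this)]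
    rw [interleave, dif_neg (by simp [hany])]
    rw [interleave, dif_neg (by simp [hany])]
  | succ N ih =>
    intro ls hsum
    by_cases hany : ls.any (fun l => !l.isEmpty) = true
    · have hanyf : (ls.filter (fun l => !l.isEmpty)).any (fun l => !l.isEmpty) = true := by
        rw [any_filter_nonempty]; exact hany
      rw [interleave, dif_pos hanyf, heads_filter]
      conv_rhs => rw [interleave]
      rw [dif_pos hany]
      congr 1
      have hsum2 : ((ls.map List.tail).map List.length).sum ≤ N := by
        have := pvSumTailsLt ls hany
        omega
      have hsum1 : (((ls.filter (fun l => !l.isEmpty)).map List.tail).map List.length).sum ≤ N := by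
        have h1 := pvSumTailsLt (ls.filter (fun l => !l.isEmpty)) hanyf
        have h2 := sum_filter_le ls
        omega
      calc interleave ((ls.filter (fun l => !l.isEmpty)).map List.tail)
          = interleave (((ls.filter (fun l => !l.isEmpty)).map List.tail).filter (fun l => !l.isEmpty)) :=
            (ih _ hsum1).symm
        _ = interleave ((ls.map List.tail).filter (fun l => !l.isEmpty)) := by rw [tails_filter]
        _ = interleave (ls.map List.tail) := ih _ hsum2
    · have hanyf : ¬ (ls.filter (fun l => !l.isEmpty)).any (fun l => !l.isEmpty) = true := by
        rw [any_filter_nonempty]; exact hany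
      rw [interleave, dif_neg hanyf]
      rw [interleave, dif_neg hany]

theorem aFor_allEmpty (n : Int) : ∀ (ds : List String) b picked seen nd,
    (∀ d ∈ ds, b.getD d [] = ([] : List (List (String × String)))) →
    aFor n ds b picked seen nd = (b, picked, seen, nd) := by
  intro ds
  induction ds with
  | nil => intro b picked seen nd _; rfl
  | cons d rest ih =>
    intro b picked seen nd h
    simp only [aFor, h d (by simp)]
    exact ih b picked seen nd (fun d' hd' => h d' (by simp [hd']))

theorem sum_length_filter_nonempty (X : List (List (List (String × String)))) :
    ((X.filter (fun l => !l.isEmpty)).map List.length).sum = (X.map List.length).sum := by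
  induction X with
  | nil => rfl
  | cons x xs ih =>
    cases x with
    | nil => simpa using ih
    | cons a t => simpa using ih

-- A's while loop is B's single pass over the column flattening
theorem aWhile_eq (n : Int) : ∀ (fuel : Nat) (b : PySem.Dict String (List (List (String × String))))
    (ds : List String) picked seen,
    ds.Nodup →
    (ds.map (fun d => (b.getD d []).length)).sum + 2 ≤ fuel →
    aWhile n fuel b ds picked seen = bPass n (interleave (ds.map (fun d => b.getD d []))) picked seen := by
  intro fuel
  induction fuel with
  | zero => intro b ds picked seen _ hfuel; omega
  | succ fuel ih =>
    intro b ds picked seen hnd hfuel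
    by_cases hc : (picked.length : Int) < n ∧ ds ≠ []
    · rw [aWhile, if_pos hc]
      obtain ⟨hlt, -⟩ := hc
      rcases hfor : aFor n ds b picked seen [] with ⟨b', p', s', nd'⟩
      simp only [hfor]
      by_cases hany : (ds.map (fun d => b.getD d [])).any (fun l => !l.isEmpty) = true
      · -- some bucket nonempty: expand one column
        have hmain := aFor_main n ds b picked seen [] b' p' s' nd' hnd hlt hfor
        rw [interleave, dif_pos hany]
        have hheads : (ds.map (fun d => b.getD d [])).filterMap List.head?
            = ds.filterMap (fun d => (b.getD d []).head?) := by
          rw [List.filterMap_map]; rfl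
        rw [hheads, hmain.1 (interleave ((ds.map (fun d => b.getD d [])).map List.tail))]
        by_cases hge : (p'.length : Int) ≥ n
        · rw [if_pos hge]
          cases fuel with
          | zero => omega
          | succ f =>
            rw [aWhile, if_neg]
            intro hcc
            exact absurd hcc.1 (not_lt.mpr hge)
        · rw [if_neg hge]
          obtain ⟨hnd'eq, hgd⟩ := hmain.2 hge
          rw [List.nil_append] at hnd'eq
          have hnd'nodup : nd'.Nodup := hnd'eq ▸ hnd.filter _
          have hlists : nd'.map (fun d => b'.getD d [])
              = ((ds.map (fun d => b.getD d [])).map List.tail).filter (fun l => !l.isEmpty) := by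
            have e1 : nd'.map (fun d => b'.getD d []) = nd'.map (fun d => (b.getD d []).tail) := by
              apply List.map_congr_left
              intro d hd
              have hdds : d ∈ ds := List.mem_of_mem_filter (hnd'eq ▸ hd)
              rw [hgd d, if_pos hdds]
            rw [e1, hnd'eq, List.map_map, List.filter_map]
            rfl
          have hsum' : (nd'.map (fun d => (b'.getD d []).length)).sum + 2 ≤ fuel := by
            have e2 : nd'.map (fun d => (b'.getD d []).length)
                = (nd'.map (fun d => b'.getD d [])).map List.length := by
              rw [List.map_map]; rfl
            have e3 : ((nd'.map (fun d => b'.getD d [])).map List.length).sum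
                = (((ds.map (fun d => b.getD d [])).map List.tail).map List.length).sum := by
              rw [hlists, sum_length_filter_nonempty]
            have h4 := pvSumTailsLt (ds.map (fun d => b.getD d [])) hany
            have e5 : (ds.map (fun d => (b.getD d []).length)).sum
                = ((ds.map (fun d => b.getD d [])).map List.length).sum := by
              rw [List.map_map]; rfl
            rw [e2, e3]
            omega
          rw [ih b' nd' p' s' hnd'nodup hsum', hlists,
            interleave_filter (((ds.map (fun d => b.getD d [])).map List.tail).map List.length).sum _ (le_refl _)]
      · -- every bucket in ds is empty: one last empty round
        have hempty : ∀ d ∈ ds, b.getD d [] = [] := by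
          intro d hd
          have h' := List.any_eq_false.mp (Bool.eq_false_iff.mpr hany) _
            (List.mem_map_of_mem hd)
          simpa using h'
        have h0 := aFor_allEmpty n ds b picked seen [] hempty
        have heq2 := h0.symm.trans hfor
        simp only [Prod.mk.injEq] at heq2
        obtain ⟨hb', hp', hs', hn'⟩ := heq2
        subst hb'; subst hp'; subst hs'; subst hn'
        rw [interleave, dif_neg hany]
        cases fuel with
        | zero => omega
        | succ f =>
          rw [aWhile, if_neg]
          · rfl
          · intro hcc
            exact hcc.2 rfl
    · rw [aWhile, if_neg hc]
      by_cases hp : (picked.length : Int) < n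
      · have hds : ds = [] := by
          by_contra hne
          exact hc ⟨hp, hne⟩
        subst hds
        rw [interleave, dif_neg (by simp)]
        rfl
      · exact (bPass_full n _ _ _ (not_lt.mp hp)).symm

-- ===== VERDICT (by name: the statement is the Claim_ definition above) =====
theorem round_robin_pick_spec : Claim_equal_round_robin_pick := by
  intro records n _
  unfold Spec_round_robin_pick round_robin_pick round_robin_pick_alt
  have hkeys : (bucket_records_by_domain records).keys.Nodup := by
    unfold bucket_records_by_domain
    apply PySem.Dict.nodup_keys_foldl_insert
    rw [PySem.List.foldl_congr_mem
      (g := fun (b : PySem.Dict String (List (List (String × String)))) r =>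
        b.insert (normalize_space (pyOrStr (recGet r "domain_letter") (some "UNK")))
          (b.getD (normalize_space (pyOrStr (recGet r "domain_letter") (some "UNK"))) [] ++ [r]))]
    · exact PySem.Dict.nodup_keys_foldl_insert_key records
        (fun r => normalize_space (pyOrStr (recGet r "domain_letter") (some "UNK")))
        (fun b r => b.getD (normalize_space (pyOrStr (recGet r "domain_letter") (some "UNK"))) [] ++ [r])
        PySem.Dict.empty PySem.Dict.nodup_keys_empty
    · intro b r _
      cases hg : b.get? (normalize_space (pyOrStr (recGet r "domain_letter") (some "UNK"))) with
      | none => simp [hg, PySem.Dict.getD_of_get?_eq_none _ _ hg]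
      | some l => simp [hg, PySem.Dict.getD_of_get?_eq_some _ _ hg]
  have hnodup : (PySem.List.sorted (bucket_records_by_domain records).keys (fun k => k)).Nodup :=
    (PySem.List.sorted_perm (bucket_records_by_domain records).keys (fun k => k) false).nodup_iff.mpr hkeys
  exact aWhile_eq n _ _ _ _ _ hnodup (le_refl _)
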